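-- pv_equiv track=rewrite | github.com/Pi0trek442/Scripts | Entropy/entropy.py | get_charset_size
-- ===== SOURCE A (Python) =====
-- import string
--
-- def get_charset_size(password):
--     charset = 0
--     if any(c.islower() for c in password):
--         charset += 26
--     if any(c.isupper() for c in password):
--         charset += 26
--     if any(c.isdigit() for c in password):
--         charset += 10
--     if any(c in string.punctuation for c in password):
--         charset += len(string.punctuation)
--     if any(c.isspace() for c in password):
--         charset += 1  # compte l'espace
--
--     return charset
-- ===== SOURCE B (Python) =====
-- import string
--
-- def get_charset_size(password):
--     has_lower = has_upper = has_digit = has_punct = has_space = False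
--     for c in password:
--         has_lower = has_lower or c.islower()
--         has_upper = has_upper or c.isupper()
--         has_digit = has_digit or c.isdigit()
--         has_punct = has_punct or c in string.punctuation
--         has_space = has_space or c.isspace()
--     return ((26 if has_lower else 0)
--             + (26 if has_upper else 0)
--             + (10 if has_digit else 0)
--             + (len(string.punctuation) if has_punct else 0)
--             + (1 if has_space else 0))
-- ===== Notes on version B (the rewrite author's own statement) =====
-- stated objective: simpler
-- what changed: Replaces A's five separate short-circuiting scans of the password with one single pass that maintains five class-presence flags, summing the class sizes afterwards.
import Mathlib
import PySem

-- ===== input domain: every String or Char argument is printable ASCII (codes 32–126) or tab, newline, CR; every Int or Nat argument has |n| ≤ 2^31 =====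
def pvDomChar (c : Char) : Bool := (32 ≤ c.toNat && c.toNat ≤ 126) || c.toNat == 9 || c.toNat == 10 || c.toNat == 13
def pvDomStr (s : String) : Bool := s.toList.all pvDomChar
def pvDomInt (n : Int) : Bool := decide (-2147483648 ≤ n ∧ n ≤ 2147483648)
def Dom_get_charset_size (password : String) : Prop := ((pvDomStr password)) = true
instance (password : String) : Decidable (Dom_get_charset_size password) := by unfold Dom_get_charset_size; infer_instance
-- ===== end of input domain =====

-- B changes the decomposition only: one pass with class-presence flags instead of five scans; same values.

-- string.punctuation
def pvPunct : List Char := "!\"#$%&'()*+,-./:;<=>?@[\\]^_`{|}~".toList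

-- ===== PORT A =====
def get_charset_size (password : String) : Int :=
  let cs := password.toList
  let charset : Int := 0
  let charset := if cs.any PySem.Chars.islower then charset + 26 else charset
  let charset := if cs.any PySem.Chars.isupper then charset + 26 else charset
  let charset := if cs.any PySem.Chars.isdigit then charset + 10 else charset
  let charset := if cs.any (fun c => pvPunct.contains c) then charset + (pvPunct.length : Int) else charset
  let charset := if cs.any PySem.Chars.isspace then charset + 1 else charset
  charset

-- ===== PORT B =====
def get_charset_size_alt (password : String) : Int :=
  let f := password.toList.foldl
    (fun (f : Bool × Bool × Bool × Bool × Bool) c =>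
      (f.1 || PySem.Chars.islower c,
       f.2.1 || PySem.Chars.isupper c,
       f.2.2.1 || PySem.Chars.isdigit c,
       f.2.2.2.1 || pvPunct.contains c,
       f.2.2.2.2 || PySem.Chars.isspace c))
    (false, false, false, false, false)
  (if f.1 then (26 : Int) else 0) + (if f.2.1 then 26 else 0) + (if f.2.2.1 then 10 else 0)
    + (if f.2.2.2.1 then (pvPunct.length : Int) else 0) + (if f.2.2.2.2 then 1 else 0)

-- ===== PRECONDITION & SPEC =====
def Spec_get_charset_size (password : String) (out : Int) : Prop := out = get_charset_size_alt password
instance (password : String) (out : Int) : Decidable (Spec_get_charset_size password out) := by unfold Spec_get_charset_size; infer_instance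

-- ===== CLAIM (what is proved, stated in full; the proofs are below) =====
def Claim_equal_get_charset_size : Prop := ∀ (password : String), Dom_get_charset_size password → Spec_get_charset_size password (get_charset_size password)

-- ===== LEMMAS AND PROOFS =====
theorem pv_flags_fold (l : List Char) (b1 b2 b3 b4 b5 : Bool) :
    l.foldl
      (fun (f : Bool × Bool × Bool × Bool × Bool) c =>
        (f.1 || PySem.Chars.islower c,
         f.2.1 || PySem.Chars.isupper c,
         f.2.2.1 || PySem.Chars.isdigit c,
         f.2.2.2.1 || pvPunct.contains c,
         f.2.2.2.2 || PySem.Chars.isspace c))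
      (b1, b2, b3, b4, b5)
    = (b1 || l.any PySem.Chars.islower,
       b2 || l.any PySem.Chars.isupper,
       b3 || l.any PySem.Chars.isdigit,
       b4 || l.any (fun c => pvPunct.contains c),
       b5 || l.any PySem.Chars.isspace) := by
  induction l generalizing b1 b2 b3 b4 b5 with
  | nil => simp
  | cons c t ih =>
      simp only [List.foldl_cons, List.any_cons, ih, Bool.or_assoc]

-- ===== VERDICT (by name: the statement is the Claim_ definition above) =====
theorem get_charset_size_spec : Claim_equal_get_charset_size := by
  intro password _
  unfold Spec_get_charset_size get_charset_size get_charset_size_alt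
  simp only [pv_flags_fold, Bool.false_or]
  split_ifs <;> ring
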